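-- pv_equiv track=rewrite | github.com/naramdash/algorithm | goorm/49088 의좋은형제/solution.py | solve
-- ===== SOURCE A (Python) =====
-- def calc_movement_from_amount(amount: int):
--     return amount // 2 + amount % 2
--
-- def solve(jinu_amount_init, sunu_amount_init, day_after):
--     jinu_amount = jinu_amount_init
--     sunu_amount = sunu_amount_init
--
--     for day in range(1, day_after + 1):
--         if day % 2 == 1:
--             movement = calc_movement_from_amount(jinu_amount)
--             jinu_amount -= movement
--             sunu_amount += movement
--         else:
--             movement = calc_movement_from_amount(sunu_amount)
--             sunu_amount -= movement
--             jinu_amount += movement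
--
--     return (jinu_amount, sunu_amount)
-- ===== SOURCE B (Python) =====
-- def solve(jinu_amount_init, sunu_amount_init, day_after):
--     cur = (jinu_amount_init, sunu_amount_init)
--     prev = None
--     day = 0
--     while day < day_after:
--         day += 1
--         j, s = cur
--         if day % 2 == 1:
--             m = j // 2 + j % 2
--             nxt = (j - m, s + m)
--         else:
--             m = s // 2 + s % 2
--             nxt = (j + m, s - m)
--         if nxt == prev:
--             # states are 2-periodic from here on: skip the remaining days by parity
--             return nxt if (day_after - day) % 2 == 0 else cur
--         prev, cur = cur, nxt
--     return cur
-- ===== Notes on version B (the rewrite author's own statement) =====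
-- stated objective: faster
-- what changed: B replaces A's day-by-day loop over all day_after days by a cycle-detecting loop: it keeps the state from two days ago, stops as soon as the alternating-transfer state repeats with period 2 (which happens after O(log max(|j|,|s|)) days), and jumps over the remaining days by parity.
import Mathlib
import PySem

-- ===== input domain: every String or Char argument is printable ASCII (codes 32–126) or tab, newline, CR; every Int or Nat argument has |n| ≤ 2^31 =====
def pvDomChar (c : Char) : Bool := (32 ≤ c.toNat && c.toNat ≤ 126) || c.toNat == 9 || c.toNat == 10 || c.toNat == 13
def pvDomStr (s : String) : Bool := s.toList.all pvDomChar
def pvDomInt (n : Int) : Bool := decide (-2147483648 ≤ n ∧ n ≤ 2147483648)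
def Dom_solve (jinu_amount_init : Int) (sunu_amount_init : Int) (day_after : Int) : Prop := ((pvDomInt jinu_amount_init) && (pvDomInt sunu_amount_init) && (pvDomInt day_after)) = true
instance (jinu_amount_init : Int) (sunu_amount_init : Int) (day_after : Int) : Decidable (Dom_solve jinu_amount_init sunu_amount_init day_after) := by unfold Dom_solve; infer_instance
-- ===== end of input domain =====

-- B detects the eventual 2-cycle of the alternating halving transfers and skips the
-- remaining days by parity instead of simulating every day (objective: faster, asymptotic).


-- ===== PORT A =====
def calc_movement_from_amount (amount : Int) : Int :=
  PySem.Int.floordiv amount 2 + PySem.Int.mod amount 2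

def solve (jinu_amount_init : Int) (sunu_amount_init : Int) (day_after : Int) : List Int :=
  let st := (PySem.List.pyRange 1 (day_after + 1) 1).foldl
    (fun (st : Int × Int) day =>
      if PySem.Int.mod day 2 == 1 then
        let movement := calc_movement_from_amount st.1
        (st.1 - movement, st.2 + movement)
      else
        let movement := calc_movement_from_amount st.2
        (st.1 + movement, st.2 - movement))
    (jinu_amount_init, sunu_amount_init)
  [st.1, st.2]

-- ===== PORT B =====
def solveAltGo (day_after : Int) (day : Int) (prev : Option (Int × Int)) (cur : Int × Int) : Int × Int :=
  if _h : day < day_after then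
    let d := day + 1
    let nxt :=
      if PySem.Int.mod d 2 == 1 then
        let m := PySem.Int.floordiv cur.1 2 + PySem.Int.mod cur.1 2
        (cur.1 - m, cur.2 + m)
      else
        let m := PySem.Int.floordiv cur.2 2 + PySem.Int.mod cur.2 2
        (cur.1 + m, cur.2 - m)
    if some nxt = prev then
      if PySem.Int.mod (day_after - d) 2 == 0 then nxt else cur
    else solveAltGo day_after d (some cur) nxt
  else cur
termination_by (day_after - day).toNat
decreasing_by omega

def solve_alt (jinu_amount_init : Int) (sunu_amount_init : Int) (day_after : Int) : List Int :=
  let r := solveAltGo day_after 0 none (jinu_amount_init, sunu_amount_init)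
  [r.1, r.2]

-- ===== PRECONDITION & SPEC =====
def Spec_solve (jinu_amount_init : Int) (sunu_amount_init : Int) (day_after : Int) (out : List Int) : Prop := out = solve_alt jinu_amount_init sunu_amount_init day_after
instance (jinu_amount_init : Int) (sunu_amount_init : Int) (day_after : Int) (out : List Int) : Decidable (Spec_solve jinu_amount_init sunu_amount_init day_after out) := by unfold Spec_solve; infer_instance

-- ===== CLAIM (what is proved, stated in full; the proofs are below) =====
def Claim_equal_solve : Prop := ∀ (jinu_amount_init : Int) (sunu_amount_init : Int) (day_after : Int), Dom_solve jinu_amount_init sunu_amount_init day_after → Spec_solve jinu_amount_init sunu_amount_init day_after (solve jinu_amount_init sunu_amount_init day_after)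

-- ===== LEMMAS AND PROOFS =====

/-- The one-day step of the simulation (A's loop body). -/
def pstep (day : Int) (st : Int × Int) : Int × Int :=
  if PySem.Int.mod day 2 == 1 then
    let movement := calc_movement_from_amount st.1
    (st.1 - movement, st.2 + movement)
  else
    let movement := calc_movement_from_amount st.2
    (st.1 + movement, st.2 - movement)

/-- State after `k` days starting from `x` (day numbers 1, 2, …). -/
def stateAt (x : Int × Int) : Nat → Int × Int
  | 0 => x
  | k + 1 => pstep ((k : Int) + 1) (stateAt x k)

lemma pstep_period (d : Int) (p : Int × Int) : pstep (d + 2) p = pstep d p := by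
  have h : PySem.Int.mod (d + 2) 2 = PySem.Int.mod d 2 := by
    rw [PySem.Int.mod_eq_emod_of_pos (by norm_num),
        PySem.Int.mod_eq_emod_of_pos (by norm_num)]
    omega
  simp only [pstep, h]

lemma stateAt_cycle (x : Int × Int) (m : Nat) (hm : 2 ≤ m)
    (h : stateAt x m = stateAt x (m - 2)) (t k : Nat) :
    stateAt x (m + 2 * t + k) = stateAt x (m + k) := by
  induction t with
  | zero => rfl
  | succ t ih =>
    have step2 : ∀ s : Nat, stateAt x (m + s) = stateAt x (m - 2 + s) := by
      intro s
      induction s with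
      | zero => simpa using h
      | succ s ihs =>
        have : m + (s + 1) = (m + s) + 1 := by omega
        rw [this, stateAt, ihs]
        have : m - 2 + (s + 1) = (m - 2 + s) + 1 := by omega
        rw [this, stateAt]
        have harg : ((m + s : Nat) : Int) + 1 = (((m - 2 + s : Nat) : Int) + 1) + 2 := by
          omega
        rw [harg, pstep_period]
    have h1 : m + 2 * (t + 1) + k = m + (2 * t + k + 2) := by omega
    have h2 : m - 2 + (2 * t + k + 2) = m + 2 * t + k := by omega
    rw [h1, step2 (2 * t + k + 2), h2, ih]

lemma stateAt_succ_of_cycle (x : Int × Int) (m : Nat) (hm : 2 ≤ m)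
    (h : stateAt x m = stateAt x (m - 2)) :
    stateAt x (m + 1) = stateAt x (m - 1) := by
  have hm1 : m - 1 = (m - 2) + 1 := by omega
  rw [show m + 1 = m + 1 from rfl, stateAt, h, hm1, stateAt]
  have harg : ((m : Nat) : Int) + 1 = (((m - 2 : Nat) : Int) + 1) + 2 := by push_cast; omega
  rw [harg, pstep_period]

lemma foldA (x : Int × Int) (n : Nat) :
    (PySem.List.pyRange 1 ((n : Int) + 1) 1).foldl
      (fun (st : Int × Int) day =>
        if PySem.Int.mod day 2 == 1 then
          let movement := calc_movement_from_amount st.1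
          (st.1 - movement, st.2 + movement)
        else
          let movement := calc_movement_from_amount st.2
          (st.1 + movement, st.2 - movement)) x = stateAt x n := by
  induction n with
  | zero =>
    rw [show ((0 : Nat) : Int) + 1 = 1 by norm_num, PySem.List.pyRange_one_eq_nil le_rfl]
    rfl
  | succ k ih =>
    have hsplit : PySem.List.pyRange 1 (((k + 1 : Nat) : Int) + 1) 1
        = PySem.List.pyRange 1 ((k : Int) + 1) 1 ++ [(k : Int) + 1] := by
      have : ((k + 1 : Nat) : Int) + 1 = ((k : Int) + 1) + 1 := by push_cast; ring
      rw [this, PySem.List.pyRange_one_succ_right (by omega : (1:Int) ≤ (k : Int) + 1)]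
    rw [hsplit, List.foldl_append, ih]
    simp only [List.foldl_cons, List.foldl_nil, stateAt, pstep]

lemma solve_eq_stateAt (j s n : Int) :
    solve j s n = [(stateAt (j, s) n.toNat).1, (stateAt (j, s) n.toNat).2] := by
  unfold solve
  by_cases hn : n ≤ 0
  · rw [PySem.List.pyRange_one_eq_nil (by omega : n + 1 ≤ 1)]
    have : n.toNat = 0 := by omega
    simp [this, stateAt]
  · have : n + 1 = ((n.toNat : Int)) + 1 := by omega
    rw [this, foldA]

lemma nxt_eq_pstep (d : Int) (cur : Int × Int) :
    (if PySem.Int.mod d 2 == 1 then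
        let m := PySem.Int.floordiv cur.1 2 + PySem.Int.mod cur.1 2
        (cur.1 - m, cur.2 + m)
      else
        let m := PySem.Int.floordiv cur.2 2 + PySem.Int.mod cur.2 2
        (cur.1 + m, cur.2 - m)) = pstep d cur := rfl

lemma goB (x : Int × Int) (n : Int) :
    ∀ (fuel : Nat) (day : Nat) (prev : Option (Int × Int)),
      (n - (day : Int)).toNat = fuel →
      ((day : Int) ≤ n ∨ day = 0) →
      (∀ p, prev = some p → 1 ≤ day ∧ p = stateAt x (day - 1)) →
      solveAltGo n (day : Int) prev (stateAt x day) = stateAt x n.toNat := by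
  intro fuel
  induction fuel with
  | zero =>
    intro day prev hfuel hday _
    rw [solveAltGo]
    have hnd : ¬ ((day : Int) < n) := by omega
    rw [dif_neg hnd]
    have : n.toNat = day ∨ (day = 0 ∧ n.toNat = 0) := by omega
    rcases this with h | ⟨h1, h2⟩
    · rw [h]
    · rw [h1, h2]
  | succ fuel ih =>
    intro day prev hfuel hday hprev
    rw [solveAltGo]
    have hlt : (day : Int) < n := by omega
    rw [dif_pos hlt]
    simp only [nxt_eq_pstep]
    have hstep : pstep ((day : Int) + 1) (stateAt x day) = stateAt x (day + 1) := by
      rw [stateAt]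
    rw [hstep]
    by_cases hrep : some (stateAt x (day + 1)) = prev
    · rw [if_pos hrep]
      obtain ⟨hday1, hpe⟩ := hprev _ hrep.symm
      set m : Nat := day + 1 with hm
      have hm2 : 2 ≤ m := by omega
      have hcyc : stateAt x m = stateAt x (m - 2) := by
        rw [hpe, show day - 1 = m - 2 from by omega]
      have hmn : m ≤ n.toNat := by omega
      have hmod : PySem.Int.mod (n - ((day : Int) + 1)) 2
          = ((n.toNat - m : Nat) : Int) % 2 := by
        rw [PySem.Int.mod_eq_emod_of_pos (by norm_num)]
        have : n - ((day : Int) + 1) = ((n.toNat - m : Nat) : Int) := by omega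
        rw [this]
      by_cases hpar : (n.toNat - m) % 2 = 0
      · have hc : (PySem.Int.mod (n - ((day : Int) + 1)) 2 == 0) = true := by
          rw [hmod]; simp only [beq_iff_eq]; omega
        rw [if_pos hc]
        obtain ⟨t, ht⟩ : ∃ t, n.toNat - m = 2 * t := ⟨(n.toNat - m) / 2, by omega⟩
        have : n.toNat = m + 2 * t + 0 := by omega
        rw [this, stateAt_cycle x m hm2 hcyc t 0]
      · have hc : ¬ ((PySem.Int.mod (n - ((day : Int) + 1)) 2 == 0) = true) := by
          rw [hmod]; simp only [beq_iff_eq]; omega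
        rw [if_neg hc]
        obtain ⟨t, ht⟩ : ∃ t, n.toNat - m = 2 * t + 1 := ⟨(n.toNat - m) / 2, by omega⟩
        have : n.toNat = m + 2 * t + 1 := by omega
        rw [this, stateAt_cycle x m hm2 hcyc t 1,
            stateAt_succ_of_cycle x m hm2 hcyc]
        congr 1
    · rw [if_neg hrep]
      have hcast : (day : Int) + 1 = ((day + 1 : Nat) : Int) := by push_cast; ring
      rw [hcast]
      exact ih (day + 1) (some (stateAt x day))
        (by omega) (by left; omega)
        (by intro p hp; refine ⟨by omega, ?_⟩
            cases hp; congr 1)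

lemma solve_alt_eq_stateAt (j s n : Int) :
    solve_alt j s n = [(stateAt (j, s) n.toNat).1, (stateAt (j, s) n.toNat).2] := by
  unfold solve_alt
  have h := goB (j, s) n (n - 0).toNat 0 none rfl (by omega)
    (by intro p hp; cases hp)
  simp only [Nat.cast_zero] at h
  rw [show stateAt (j, s) 0 = (j, s) from rfl] at h
  rw [h]

-- ===== VERDICT (by name: the statement is the Claim_ definition above) =====
theorem solve_spec : Claim_equal_solve := by
  intro j s n _
  unfold Spec_solve
  rw [solve_eq_stateAt, solve_alt_eq_stateAt]
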